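-- pv_equiv track=rewrite | github.com/dx-nyasan/jigyokei-app | src/core/history_tracker.py | _extract_section_scores
-- ===== SOURCE A (Python) =====
-- from typing import Dict, List, Any, Optional
--
-- def _extract_section_scores(audit_result: Dict[str, Any]) -> Dict[str, int]:
--     """Extract section-level scores from audit result."""
--     # Approximate section scores from missing items
--     sections = {
--         "BasicInfo": 100,
--         "Goals": 100,
--         "Disaster": 100,
--         "ResponseProcedures": 100,
--         "Measures": 100,
--         "FinancialPlan": 100,
--         "PDCA": 100
--     }
--
--     for item in audit_result.get("missing_mandatory", []):
--         section = item.get("section", "")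
--         severity = item.get("severity", "warning")
--
--         if section in sections:
--             if severity == "critical":
--                 sections[section] = max(0, sections[section] - 30)
--             elif severity == "warning":
--                 sections[section] = max(0, sections[section] - 15)
--
--     return sections
-- ===== SOURCE B (Python) =====
-- def _extract_section_scores(audit_result):
--     """Extract section-level scores from audit result."""
--     items = audit_result.get("missing_mandatory", [])
--     def score(name):
--         crit = sum(1 for it in items
--                    if it.get("section", "") == name
--                    and it.get("severity", "warning") == "critical")
--         warn = sum(1 for it in items
--                    if it.get("section", "") == name
--                    and it.get("severity", "warning") == "warning")
--         return max(0, 100 - 30 * crit - 15 * warn)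
--     return {name: score(name)
--             for name in ["BasicInfo", "Goals", "Disaster", "ResponseProcedures",
--                          "Measures", "FinancialPlan", "PDCA"]}
-- ===== Notes on version B (the rewrite author's own statement) =====
-- stated objective: alternative
-- what changed: B keeps no mutable score state at all: for each of the seven fixed sections it counts the critical and the warning items aimed at that section over the item list and computes the score by the closed formula max(0, 100 - 30*crit - 15*warn), instead of A's single pass that mutates and re-clamps a pre-filled score dict per item; correct because all deductions are non-negative, so one final clamp equals A's per-step clamps.
import Mathlib
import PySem

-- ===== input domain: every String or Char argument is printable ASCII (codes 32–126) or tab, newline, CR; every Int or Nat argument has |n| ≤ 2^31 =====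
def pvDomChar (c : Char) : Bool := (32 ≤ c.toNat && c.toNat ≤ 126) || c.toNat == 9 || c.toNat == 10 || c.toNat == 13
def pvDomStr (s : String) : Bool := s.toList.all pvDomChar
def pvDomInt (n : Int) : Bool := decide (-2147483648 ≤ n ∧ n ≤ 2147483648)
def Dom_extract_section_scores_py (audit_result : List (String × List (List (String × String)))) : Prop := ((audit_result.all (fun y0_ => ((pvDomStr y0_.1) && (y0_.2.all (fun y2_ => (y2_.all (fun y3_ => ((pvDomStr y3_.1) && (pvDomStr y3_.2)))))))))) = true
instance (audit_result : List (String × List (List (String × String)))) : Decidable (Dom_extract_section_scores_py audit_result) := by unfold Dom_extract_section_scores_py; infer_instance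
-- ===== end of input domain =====

-- B replaces A's mutable, per-item clamped score dict by stateless per-section counting with a closed scoring formula; same result, similar cost.
-- ===== PORT A =====
-- A: pre-filled score dict, per-item clamped in-place deduction.
def extract_section_scores_py (audit_result : List (String × List (List (String × String)))) : List (String × Int) :=
  let sections : PySem.Dict String Int :=
    PySem.Dict.mk [("BasicInfo", 100), ("Goals", 100), ("Disaster", 100),
      ("ResponseProcedures", 100), ("Measures", 100), ("FinancialPlan", 100), ("PDCA", 100)]
  let items := (PySem.Dict.mk audit_result).getD "missing_mandatory" []
  let final := items.foldl (fun secs item =>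
    let sec := (PySem.Dict.mk item).getD "section" ""
    let severity := (PySem.Dict.mk item).getD "severity" "warning"
    if secs.contains sec then
      if severity = "critical" then
        secs.insert sec (max 0 (secs.getD sec 0 - 30))
      else if severity = "warning" then
        secs.insert sec (max 0 (secs.getD sec 0 - 15))
      else secs
    else secs) sections
  final.items

-- ===== PORT B =====
def pvNames : List String :=
  ["BasicInfo", "Goals", "Disaster", "ResponseProcedures", "Measures", "FinancialPlan", "PDCA"]

-- B: no mutable state; per section, count critical and warning hits and score by a closed formula.
def extract_section_scores_py_alt (audit_result : List (String × List (List (String × String)))) : List (String × Int) :=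
  let items := (PySem.Dict.mk audit_result).getD "missing_mandatory" []
  let score := fun (name : String) =>
    let crit := items.countP (fun it =>
      ((PySem.Dict.mk it).getD "section" "" == name) &&
      ((PySem.Dict.mk it).getD "severity" "warning" == "critical"))
    let warn := items.countP (fun it =>
      ((PySem.Dict.mk it).getD "section" "" == name) &&
      ((PySem.Dict.mk it).getD "severity" "warning" == "warning"))
    max 0 (100 - 30 * (crit : Int) - 15 * (warn : Int))
  pvNames.map (fun name => (name, score name))

-- ===== PRECONDITION & SPEC =====
def Spec_extract_section_scores_py (audit_result : List (String × List (List (String × String)))) (out : List (String × Int)) : Prop := out = extract_section_scores_py_alt audit_result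
instance (audit_result : List (String × List (List (String × String)))) (out : List (String × Int)) : Decidable (Spec_extract_section_scores_py audit_result out) := by unfold Spec_extract_section_scores_py; infer_instance

-- ===== CLAIM (what is proved, stated in full; the proofs are below) =====
def Claim_equal_extract_section_scores_py : Prop := ∀ (audit_result : List (String × List (List (String × String)))), Dom_extract_section_scores_py audit_result → Spec_extract_section_scores_py audit_result (extract_section_scores_py audit_result)

-- ===== LEMMAS AND PROOFS =====

-- Proof-internal deduction accumulator bridging A's clamped fold to B's counts.
def pvDed (items : List (List (String × String))) (ded : PySem.Dict String Int) : PySem.Dict String Int :=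
  items.foldl (fun ded item =>
    let sec := (PySem.Dict.mk item).getD "section" ""
    let sev := (PySem.Dict.mk item).getD "severity" "warning"
    if sec ∈ pvNames then
      ded.insert sec (ded.getD sec 0 + (if sev = "critical" then 30 else if sev = "warning" then 15 else 0))
    else ded) ded

-- The invariant: A's score dict is always the seven names mapped through a final clamp of the deductions.
def pvState (ded : PySem.Dict String Int) : PySem.Dict String Int :=
  PySem.Dict.mk (pvNames.map (fun name => (name, max 0 (100 - ded.getD name 0))))

lemma pvState_insert (ded : PySem.Dict String Int) (k : String) (d : Int) :
    pvState (ded.insert k d)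
    = PySem.Dict.mk (pvNames.map (fun n => (n, max 0 (100 - if n = k then d else ded.getD n 0)))) := by
  simp only [pvState, PySem.Dict.getD_insert]

lemma pvState_contains (ded : PySem.Dict String Int) (k : String) :
    (pvState ded).contains k = decide (k ∈ pvNames) := by
  rw [PySem.Dict.contains_eq_decide_mem_keys]
  have hk : (pvState ded).keys = pvNames := by
    simp [pvState, PySem.Dict.keys, pvNames]
  rw [hk]

lemma pvStep' (ded : PySem.Dict String Int) (sec sev : String) :
    (if (pvState ded).contains sec then
       if sev = "critical" then
         (pvState ded).insert sec (max 0 ((pvState ded).getD sec 0 - 30))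
       else if sev = "warning" then
         (pvState ded).insert sec (max 0 ((pvState ded).getD sec 0 - 15))
       else pvState ded
     else pvState ded)
    = pvState (if sec ∈ pvNames then
         ded.insert sec (ded.getD sec 0 + (if sev = "critical" then 30 else if sev = "warning" then 15 else 0))
       else ded) := by
  rw [pvState_contains]
  by_cases h : sec ∈ pvNames
  · simp only [h, decide_true, if_true, pvState_insert]
    simp only [pvNames, List.mem_cons, List.not_mem_nil, or_false] at h
    rcases h with rfl|rfl|rfl|rfl|rfl|rfl|rfl <;>
      by_cases h1 : sev = "critical" <;> by_cases h2 : sev = "warning" <;>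
        simp [h1, h2, pvState, pvNames, PySem.Dict.insert, PySem.Dict.getD, PySem.Dict.get?] <;>
          omega
  · simp [h]

lemma pvFold (items : List (List (String × String))) (ded : PySem.Dict String Int) :
    items.foldl (fun secs item =>
      let sec := (PySem.Dict.mk item).getD "section" ""
      let severity := (PySem.Dict.mk item).getD "severity" "warning"
      if secs.contains sec then
        if severity = "critical" then
          secs.insert sec (max 0 (secs.getD sec 0 - 30))
        else if severity = "warning" then
          secs.insert sec (max 0 (secs.getD sec 0 - 15))
        else secs
      else secs) (pvState ded)
    = pvState (pvDed items ded) := by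
  induction items generalizing ded with
  | nil => rfl
  | cons item rest ih =>
      simp only [pvDed, List.foldl_cons, pvStep' ded]
      exact ih _

-- Deductions accumulated by pvDed are exactly 30·(critical count) + 15·(warning count) per name.
lemma pvCount (items : List (List (String × String))) (ded : PySem.Dict String Int)
    (name : String) (h : name ∈ pvNames) :
    (pvDed items ded).getD name 0
    = ded.getD name 0
      + 30 * ((items.countP (fun it =>
          ((PySem.Dict.mk it).getD "section" "" == name) &&
          ((PySem.Dict.mk it).getD "severity" "warning" == "critical"))) : Int)
      + 15 * ((items.countP (fun it =>
          ((PySem.Dict.mk it).getD "section" "" == name) &&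
          ((PySem.Dict.mk it).getD "severity" "warning" == "warning"))) : Int) := by
  induction items generalizing ded with
  | nil => simp [pvDed]
  | cons item rest ih =>
      simp only [pvDed, List.foldl_cons] at ih ⊢
      rw [ih]
      by_cases hm : (PySem.Dict.mk item).getD "section" "" ∈ pvNames
      · simp only [hm, if_true]
        by_cases he : (PySem.Dict.mk item).getD "section" "" = name
        · rw [he, PySem.Dict.getD_insert]
          simp only [if_pos rfl, List.countP_cons, he, beq_self_eq_true, Bool.true_and]
          by_cases h1 : (PySem.Dict.mk item).getD "severity" "warning" = "critical" <;>
            by_cases h2 : (PySem.Dict.mk item).getD "severity" "warning" = "warning" <;>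
              simp [h1, h2] <;> push_cast <;> ring
        · rw [PySem.Dict.getD_insert]
          have hne : ¬ name = (PySem.Dict.mk item).getD "section" "" := fun e => he e.symm
          simp only [if_neg hne, List.countP_cons]
          simp [he]
      · simp only [hm, if_false, List.countP_cons]
        have he : ¬ (PySem.Dict.mk item).getD "section" "" = name := fun e => hm (e ▸ h)
        simp [he]

-- ===== VERDICT (by name: the statement is the Claim_ definition above) =====
theorem extract_section_scores_py_spec : Claim_equal_extract_section_scores_py := by
  intro audit_result _
  unfold Spec_extract_section_scores_py extract_section_scores_py extract_section_scores_py_alt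
  have h0 : (PySem.Dict.mk [("BasicInfo", (100:Int)), ("Goals", 100), ("Disaster", 100),
      ("ResponseProcedures", 100), ("Measures", 100), ("FinancialPlan", 100), ("PDCA", 100)])
      = pvState PySem.Dict.empty := by decide
  simp only [h0]
  rw [show ∀ (items : List (List (String × String))), items.foldl (fun secs item =>
      let sec := (PySem.Dict.mk item).getD "section" ""
      let severity := (PySem.Dict.mk item).getD "severity" "warning"
      if secs.contains sec then
        if severity = "critical" then
          secs.insert sec (max 0 (secs.getD sec 0 - 30))
        else if severity = "warning" then
          secs.insert sec (max 0 (secs.getD sec 0 - 15))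
        else secs
      else secs) (pvState PySem.Dict.empty) = pvState (pvDed items PySem.Dict.empty)
    from fun items => pvFold items PySem.Dict.empty]
  show (pvState _).items = _
  simp only [pvState]
  apply List.map_congr_left
  intro name hn
  rw [pvCount _ _ _ hn]
  simp only [PySem.Dict.getD_empty, Prod.mk.injEq, true_and]
  omega
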